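-- pv_equiv track=rewrite | github.com/micahtyong/foobar | solution2balt.py | pay_minimum
-- ===== SOURCE A (Python) =====
-- def pay_minimum(total_lambs):
--     mem_fib = memoize(fib)
--     number_of_henchmen = 0
--     total = 0
--     n = 1
--     while (total + mem_fib(n)) <= total_lambs:
--         total += mem_fib(n)
--         n += 1
--         number_of_henchmen += 1
--     return number_of_henchmen
--
-- def fib(n):
--     if n <= 1:
--         return n
--     else:
--         return(fib(n - 1) + fib(n - 2))
--
-- def memoize(f):
--     memo = {}
--
--     def helper(x):
--         if x not in memo:
--             memo[x] = f(x)
--         return memo[x]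
--     return helper
-- ===== SOURCE B (Python) =====
-- def pay_minimum(total_lambs):
--     count = 0
--     total = 0
--     a, b = 0, 1
--     while total + b <= total_lambs:
--         total += b
--         a, b = b, a + b
--         count += 1
--     return count
-- ===== Notes on version B (the rewrite author's own statement) =====
-- stated objective: faster
-- what changed: Replaces the memoized exponential recursive fib recomputed at every loop step with a single iterative pass maintaining the Fibonacci pair and running sum.
import Mathlib
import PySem

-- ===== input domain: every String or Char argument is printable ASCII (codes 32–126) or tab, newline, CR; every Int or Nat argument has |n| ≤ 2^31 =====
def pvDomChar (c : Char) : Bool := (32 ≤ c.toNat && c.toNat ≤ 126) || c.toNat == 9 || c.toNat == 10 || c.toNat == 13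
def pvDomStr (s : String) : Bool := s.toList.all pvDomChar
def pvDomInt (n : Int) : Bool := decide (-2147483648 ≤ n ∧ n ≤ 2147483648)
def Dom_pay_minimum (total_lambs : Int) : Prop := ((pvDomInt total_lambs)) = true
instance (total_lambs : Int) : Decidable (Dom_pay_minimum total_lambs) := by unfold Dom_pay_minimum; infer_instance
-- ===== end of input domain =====

-- B replaces A's per-step recursive Fibonacci with one iterative pass maintaining the
-- Fibonacci pair and the running sum (objective: faster, asymptotic).

-- ===== PORT A =====
-- A's recursive fib (the memoize wrapper caches values but does not change them,
-- so the port computes the same function).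
def fibA (n : Int) : Int :=
  if n ≤ 1 then n else fibA (n - 1) + fibA (n - 2)
termination_by n.toNat
decreasing_by all_goals omega

-- positivity facts about fibA, needed for the termination of A's while loop
lemma fibA_nonneg_aux : ∀ k : Nat, ∀ n : Int, n.toNat = k → 0 ≤ n → 0 ≤ fibA n := by
  intro k
  induction k using Nat.strong_induction_on with
  | _ k ih =>
    intro n hk hn
    rw [fibA]
    split_ifs with h
    · omega
    · have h1 := ih (n - 1).toNat (by omega) (n - 1) rfl (by omega)
      have h2 := ih (n - 2).toNat (by omega) (n - 2) rfl (by omega)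
      omega

lemma fibA_nonneg (n : Int) (h : 0 ≤ n) : 0 ≤ fibA n :=
  fibA_nonneg_aux n.toNat n rfl h

lemma fibA_pos_aux : ∀ k : Nat, ∀ n : Int, n.toNat = k → 1 ≤ n → 1 ≤ fibA n := by
  intro k
  induction k using Nat.strong_induction_on with
  | _ k ih =>
    intro n hk hn
    rw [fibA]
    split_ifs with h
    · omega
    · have h1 := ih (n - 1).toNat (by omega) (n - 1) rfl (by omega)
      have h2 := fibA_nonneg (n - 2) (by omega)
      omega

lemma fibA_pos (n : Int) (h : 1 ≤ n) : 1 ≤ fibA n :=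
  fibA_pos_aux n.toNat n rfl h

-- A's while loop: total and n evolve as in the Python; the hypothesis 1 ≤ n is the
-- loop invariant (n starts at 1), used only for termination.
def loopA (tl total n cnt : Int) (hn : 1 ≤ n) : Int :=
  if total + fibA n ≤ tl then
    loopA tl (total + fibA n) (n + 1) (cnt + 1) (by omega)
  else cnt
termination_by (tl - total).toNat
decreasing_by
  have := fibA_pos n hn
  omega

def pay_minimum (total_lambs : Int) : Int :=
  loopA total_lambs 0 1 0 (by norm_num)

-- ===== PORT B =====
-- B's while loop: (a, b) is the Fibonacci pair; the hypotheses are the loop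
-- invariants (a starts at 0, b at 1), used only for termination.
def loopB (tl a b total cnt : Int) (ha : 0 ≤ a) (hb : 1 ≤ b) : Int :=
  if total + b ≤ tl then
    loopB tl b (a + b) (total + b) (cnt + 1) (by omega) (by omega)
  else cnt
termination_by (tl - total).toNat
decreasing_by omega

def pay_minimum_alt (total_lambs : Int) : Int :=
  loopB total_lambs 0 1 0 0 (by norm_num) (by norm_num)

-- ===== PRECONDITION & SPEC =====
def Spec_pay_minimum (total_lambs : Int) (out : Int) : Prop := out = pay_minimum_alt total_lambs
instance (total_lambs : Int) (out : Int) : Decidable (Spec_pay_minimum total_lambs out) := by unfold Spec_pay_minimum; infer_instance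

-- ===== CLAIM (what is proved, stated in full; the proofs are below) =====
def Claim_equal_pay_minimum : Prop := ∀ (total_lambs : Int), Dom_pay_minimum total_lambs → Spec_pay_minimum total_lambs (pay_minimum total_lambs)

-- ===== LEMMAS AND PROOFS =====

lemma loopB_congr {tl a a' b b' total cnt : Int}
    (ha : 0 ≤ a) (hb : 1 ≤ b) (ha' : 0 ≤ a') (hb' : 1 ≤ b')
    (h1 : a = a') (h2 : b = b') :
    loopB tl a b total cnt ha hb = loopB tl a' b' total cnt ha' hb' := by
  subst h1; subst h2; rfl

lemma fibA_rec (n : Int) (hn : 1 ≤ n) : fibA (n + 1) = fibA (n - 1) + fibA n := by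
  rw [fibA]
  split_ifs with h
  · omega
  · have e1 : n + 1 - 1 = n := by ring
    have e2 : n + 1 - 2 = n - 1 := by ring
    rw [e1, e2]
    ring

lemma key (tl : Int) : ∀ fuel : Nat, ∀ total n cnt : Int, ∀ hn : 1 ≤ n,
    (tl - total).toNat ≤ fuel →
    loopA tl total n cnt hn =
      loopB tl (fibA (n - 1)) (fibA n) total cnt
        (fibA_nonneg (n - 1) (by omega)) (fibA_pos n hn) := by
  intro fuel
  induction fuel with
  | zero =>
    intro total n cnt hn hf
    have hp := fibA_pos n hn
    rw [loopA, loopB]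
    rw [if_neg (by omega), if_neg (by omega)]
  | succ fuel ih =>
    intro total n cnt hn hf
    rw [loopA, loopB]
    split_ifs with h
    · have hp := fibA_pos n hn
      have step := ih (total + fibA n) (n + 1) (cnt + 1) (by omega) (by omega)
      rw [step]
      apply loopB_congr
      · congr 1; ring
      · rw [fibA_rec n hn]
    · rfl

theorem pay_minimum_eq (tl : Int) : pay_minimum tl = pay_minimum_alt tl := by
  unfold pay_minimum pay_minimum_alt
  have h := key tl (tl - 0).toNat 0 1 0 (by norm_num) (by omega)
  rw [h]
  apply loopB_congr
  · rw [show (1 : Int) - 1 = 0 by ring, fibA]; norm_num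
  · rw [fibA]; norm_num

-- ===== VERDICT (by name: the statement is the Claim_ definition above) =====
theorem pay_minimum_spec : Claim_equal_pay_minimum := by
  intro tl _
  unfold Spec_pay_minimum
  exact pay_minimum_eq tl
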